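-- pv_equiv track=rewrite | github.com/ServiceLayerNetworking/SLATE | global-controller/optimizer_header.py | get_max_load
-- ===== SOURCE A (Python) =====
-- def get_max_load(num_requests):
--     max_load = dict()
--     for cid in range(len(num_requests)):
--         for request_type in num_requests[cid]:
--             if request_type not in max_load:
--                 max_load[request_type] = 0
--             max_load[request_type] += num_requests[cid][request_type]
--     return max_load
-- ===== SOURCE B (Python) =====
-- def get_max_load(num_requests):
--     # Transposed nesting: pass 1 collects the union of request types in
--     # first-occurrence order; pass 2 sums each type across all clusters.
--     keys = {}
--     for d in num_requests:
--         keys.update(dict.fromkeys(d))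
--     return {rt: sum(d[rt] for d in num_requests if rt in d) for rt in keys}
-- ===== Notes on version B (the rewrite author's own statement) =====
-- stated objective: alternative
-- what changed: B transposes the loop nesting and stages the work: a first pass collects the union of request types (dict.fromkeys/update), then a dict comprehension iterates over the types and, per type, an inner sum scans the clusters; A iterates clusters outer/types inner with a running total per key.
import Mathlib
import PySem

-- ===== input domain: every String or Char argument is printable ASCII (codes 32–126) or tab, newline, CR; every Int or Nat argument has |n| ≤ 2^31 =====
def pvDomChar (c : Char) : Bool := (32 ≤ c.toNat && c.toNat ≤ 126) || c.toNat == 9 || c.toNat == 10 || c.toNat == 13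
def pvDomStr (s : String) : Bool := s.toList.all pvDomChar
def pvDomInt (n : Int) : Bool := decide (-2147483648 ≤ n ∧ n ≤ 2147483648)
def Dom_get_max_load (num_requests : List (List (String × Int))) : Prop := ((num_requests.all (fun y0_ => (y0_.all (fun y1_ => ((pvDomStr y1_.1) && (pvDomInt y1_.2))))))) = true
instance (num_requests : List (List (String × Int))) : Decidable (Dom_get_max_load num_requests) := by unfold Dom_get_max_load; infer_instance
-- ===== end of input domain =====

-- B transposes the loop nesting into two staged passes: first collect the union of
-- request types, then sum each type across the clusters (objective: alternative, same cost).

-- ===== PORT A =====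
-- one step of A's inner loop over the keys of cluster d:
-- 'if request_type not in max_load: max_load[request_type] = 0; max_load[request_type] += d[request_type]'
-- (d[request_type] is ported as getD _ 0; it is exact because the iterated key is a key of d)
def aStep (d : List (String × Int)) (m : PySem.Dict String Int) (k : String) : PySem.Dict String Int :=
  let m1 := if m.contains k then m else m.insert k 0
  m1.insert k (m1.getD k 0 + (PySem.Dict.mk d).getD k 0)

def get_max_load (num_requests : List (List (String × Int))) : List (String × Int) :=
  (num_requests.foldl (fun m d => (d.map Prod.fst).foldl (aStep d) m) PySem.Dict.empty).items

-- ===== PORT B =====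
-- 'keys.update(dict.fromkeys(d))' adds d's keys in order, keeping existing positions:
-- that is PySem.Set.add folded over d's keys; 'sum(d[rt] for d in num_requests if rt in d)'
-- is a fold over the clusters guarded by contains (d[rt] as getD, exact under the guard).
def get_max_load_alt (num_requests : List (List (String × Int))) : List (String × Int) :=
  let keys : PySem.Set String :=
    num_requests.foldl (fun ks d => (d.map Prod.fst).foldl PySem.Set.add ks) []
  keys.map (fun rt =>
    (rt, num_requests.foldl (fun acc d =>
          if (PySem.Dict.mk d).contains rt then acc + (PySem.Dict.mk d).getD rt 0 else acc) 0))

-- ===== PRECONDITION & SPEC =====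
-- Each inner list stands for a Python dict, whose keys are necessarily distinct;
-- Pre_ states exactly that and excludes no input the Python A can actually receive.
def Pre_get_max_load (num_requests : List (List (String × Int))) : Prop :=
  ∀ d ∈ num_requests, (d.map Prod.fst).Nodup
instance (num_requests : List (List (String × Int))) : Decidable (Pre_get_max_load num_requests) := by unfold Pre_get_max_load; infer_instance

def pvWitness_get_max_load : (List (List (String × Int))) :=
  [[("a", 1)], [("a", 2), ("b", 3)]]

def Spec_get_max_load (num_requests : List (List (String × Int))) (out : List (String × Int)) : Prop := out = get_max_load_alt num_requests
instance (num_requests : List (List (String × Int))) (out : List (String × Int)) : Decidable (Spec_get_max_load num_requests out) := by unfold Spec_get_max_load; infer_instance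

-- ===== CLAIM (what is proved, stated in full; the proofs are below) =====
def Claim_equal_get_max_load : Prop := ∀ (num_requests : List (List (String × Int))), Dom_get_max_load num_requests → Pre_get_max_load num_requests → Spec_get_max_load num_requests (get_max_load num_requests)

-- ===== LEMMAS AND PROOFS =====

theorem aStep_getD (d : List (String × Int)) (m : PySem.Dict String Int) (j k : String) :
    (aStep d m j).getD k 0 =
      if k = j then m.getD k 0 + (PySem.Dict.mk d).getD k 0 else m.getD k 0 := by
  unfold aStep
  by_cases hc : m.contains j
  · simp only [hc, if_true]
    rw [PySem.Dict.getD_insert]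
    by_cases hk : k = j
    · subst hk; simp
    · simp [hk]
  · have hc' : m.contains j = false := by simpa using hc
    simp only [hc, if_false, Bool.false_eq_true]
    rw [PySem.Dict.getD_insert, PySem.Dict.getD_insert]
    by_cases hk : k = j
    · subst hk; simp [PySem.Dict.getD_of_not_contains m 0 hc']
    · simp [PySem.Dict.getD_insert, hk]

theorem aStep_keys (d : List (String × Int)) (m : PySem.Dict String Int) (j : String) :
    (aStep d m j).keys = PySem.Set.add m.keys j := by
  unfold aStep
  by_cases hc : m.contains j
  · have hmem : j ∈ m.keys := (PySem.Dict.contains_iff_mem_keys m j).1 hc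
    simp only [hc, if_true]
    rw [PySem.Dict.keys_insert_of_contains m _ hc, PySem.Set.add_of_mem hmem]
  · have hc' : m.contains j = false := by simpa using hc
    have hmem : j ∉ m.keys := fun h => hc ((PySem.Dict.contains_iff_mem_keys m j).2 h)
    simp only [hc, if_false, Bool.false_eq_true]
    rw [PySem.Dict.keys_insert_of_contains _ _ (PySem.Dict.contains_insert_self m j 0),
        PySem.Dict.keys_insert_of_not_contains m _ hc',
        PySem.Set.add_of_not_mem hmem]

theorem inner_getD (d : List (String × Int)) (l : List String)
    (m : PySem.Dict String Int) (k : String) :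
    ((l.foldl (aStep d) m).getD k 0) =
      m.getD k 0 + (l.count k : Int) * (PySem.Dict.mk d).getD k 0 := by
  induction l generalizing m with
  | nil => simp
  | cons j t ih =>
    simp only [List.foldl_cons, ih, aStep_getD, List.count_cons]
    by_cases hk : k = j
    · subst hk; simp; ring
    · have hjk : ¬ j = k := fun h => hk h.symm
      simp [hk, hjk]

theorem inner_keys (d : List (String × Int)) (l : List String) (m : PySem.Dict String Int) :
    (l.foldl (aStep d) m).keys = l.foldl PySem.Set.add m.keys := by
  induction l generalizing m with
  | nil => rfl
  | cons j t ih => simp only [List.foldl_cons, ih, aStep_keys]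

theorem nodup_foldl_add (l : List String) (s : PySem.Set String) (hs : s.Nodup) :
    (l.foldl PySem.Set.add s).Nodup := by
  induction l generalizing s with
  | nil => exact hs
  | cons j t ih => exact ih _ (PySem.Set.nodup_add s j hs)

theorem nodup_outer (nr : List (List (String × Int))) (s : PySem.Set String) (hs : s.Nodup) :
    (nr.foldl (fun ks d => (d.map Prod.fst).foldl PySem.Set.add ks) s).Nodup := by
  induction nr generalizing s with
  | nil => exact hs
  | cons d t ih => exact ih _ (nodup_foldl_add _ s hs)

theorem outer_keys (nr : List (List (String × Int))) (m : PySem.Dict String Int) :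
    (nr.foldl (fun m d => (d.map Prod.fst).foldl (aStep d) m) m).keys =
      nr.foldl (fun ks d => (d.map Prod.fst).foldl PySem.Set.add ks) m.keys := by
  induction nr generalizing m with
  | nil => rfl
  | cons d t ih => simp only [List.foldl_cons, ih, inner_keys]

theorem sum_foldl_shift (k : String) (nr : List (List (String × Int))) (acc : Int) :
    nr.foldl (fun acc d =>
        if (PySem.Dict.mk d).contains k then acc + (PySem.Dict.mk d).getD k 0 else acc) acc =
      acc + nr.foldl (fun acc d =>
        if (PySem.Dict.mk d).contains k then acc + (PySem.Dict.mk d).getD k 0 else acc) 0 := by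
  induction nr generalizing acc with
  | nil => simp
  | cons d t ih =>
    simp only [List.foldl_cons]
    rw [ih, ih (if (PySem.Dict.mk d).contains k then 0 + (PySem.Dict.mk d).getD k 0 else 0)]
    split_ifs <;> ring

theorem outer_getD (nr : List (List (String × Int))) (m : PySem.Dict String Int) (k : String)
    (hpre : ∀ d ∈ nr, (d.map Prod.fst).Nodup) :
    (nr.foldl (fun m d => (d.map Prod.fst).foldl (aStep d) m) m).getD k 0 =
      m.getD k 0 + nr.foldl (fun acc d =>
        if (PySem.Dict.mk d).contains k then acc + (PySem.Dict.mk d).getD k 0 else acc) 0 := by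
  induction nr generalizing m with
  | nil => simp
  | cons d t ih =>
    simp only [List.foldl_cons]
    rw [ih _ (fun d hd => hpre d (List.mem_cons_of_mem _ hd)), inner_getD,
        sum_foldl_shift k t (if (PySem.Dict.mk d).contains k = true
          then 0 + (PySem.Dict.mk d).getD k 0 else 0)]
    have hnd : (d.map Prod.fst).Nodup := hpre d List.mem_cons_self
    have hkeys : (PySem.Dict.mk d).keys = d.map Prod.fst := by
      simp [PySem.Dict.keys]
    by_cases hmem : k ∈ d.map Prod.fst
    · have hcount : (d.map Prod.fst).count k = 1 := List.count_eq_one_of_mem hnd hmem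
      have hcont : (PySem.Dict.mk d).contains k = true := by
        rw [PySem.Dict.contains_iff_mem_keys, hkeys]; exact hmem
      simp only [hcount, hcont, if_true, Nat.cast_one]
      ring
    · have hcount : (d.map Prod.fst).count k = 0 := List.count_eq_zero.2 hmem
      have hcont : (PySem.Dict.mk d).contains k = false := by
        rw [← Bool.not_eq_true, PySem.Dict.contains_iff_mem_keys, hkeys]; exact hmem
      simp only [hcount, hcont, Bool.false_eq_true, if_false, Nat.cast_zero]
      ring

-- ===== VERDICT (by name: the statement is the Claim_ definition above) =====
theorem get_max_load_spec : Claim_equal_get_max_load := by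
  intro nr _ hpre
  unfold Spec_get_max_load get_max_load get_max_load_alt
  set M := nr.foldl (fun m d => (d.map Prod.fst).foldl (aStep d) m) PySem.Dict.empty with hM
  have hkeysM : M.keys = nr.foldl (fun ks d => (d.map Prod.fst).foldl PySem.Set.add ks) [] := by
    rw [hM, outer_keys, PySem.Dict.keys_empty]
  have hnodup : (nr.foldl (fun ks d => (d.map Prod.fst).foldl PySem.Set.add ks)
      ([] : PySem.Set String)).Nodup := nodup_outer nr [] List.nodup_nil
  rw [PySem.Dict.items_eq_map_keys M (hkeysM ▸ hnodup) 0, hkeysM]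
  apply List.map_congr_left
  intro k _
  have hMv := outer_getD nr PySem.Dict.empty k hpre
  rw [PySem.Dict.getD_empty] at hMv
  rw [hM, hMv, zero_add]
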